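-- pv_equiv track=rewrite | github.com/pypi-data/pypi-mirror-401 | packages/hdr-conversion/hdr_conversion-0.1.2.tar.gz/hdr_conversion-0.1.2/src/hdrconv/io/ios_hdr_screenshot.py | _split_ids_into_groups
-- ===== SOURCE A (Python) =====
-- def _split_ids_into_groups(ids: list[int]) -> list[list[int]]:
--     """Split non-contiguous IDs into separate groups."""
--     if not ids:
--         return []
--     groups = []
--     current_group = [ids[0]]
--     for i in range(1, len(ids)):
--         if ids[i] > ids[i - 1] + 1:
--             groups.append(current_group)
--             current_group = []
--         current_group.append(ids[i])
--     groups.append(current_group)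
--     return groups
-- ===== SOURCE B (Python) =====
-- def _split_ids_into_groups(ids: list[int]) -> list[list[int]]:
--     """Split non-contiguous IDs into separate groups.
--
--     Peels one maximal contiguous run off the front at a time instead of
--     accumulating element-by-element into a current group.
--     """
--     groups = []
--     rest = ids
--     while rest:
--         k = 1
--         while k < len(rest) and rest[k] <= rest[k - 1] + 1:
--             k += 1
--         groups.append(rest[:k])
--         rest = rest[k:]
--     return groups
-- ===== Notes on version B (the rewrite author's own statement) =====
-- stated objective: alternative
-- what changed: Replaces the single element-by-element scan that appends into a mutable current_group with an outer loop that repeatedly peels one maximal contiguous run off the front (inner scan finds the run end, then slice and recurse on the remainder).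
import Mathlib
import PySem

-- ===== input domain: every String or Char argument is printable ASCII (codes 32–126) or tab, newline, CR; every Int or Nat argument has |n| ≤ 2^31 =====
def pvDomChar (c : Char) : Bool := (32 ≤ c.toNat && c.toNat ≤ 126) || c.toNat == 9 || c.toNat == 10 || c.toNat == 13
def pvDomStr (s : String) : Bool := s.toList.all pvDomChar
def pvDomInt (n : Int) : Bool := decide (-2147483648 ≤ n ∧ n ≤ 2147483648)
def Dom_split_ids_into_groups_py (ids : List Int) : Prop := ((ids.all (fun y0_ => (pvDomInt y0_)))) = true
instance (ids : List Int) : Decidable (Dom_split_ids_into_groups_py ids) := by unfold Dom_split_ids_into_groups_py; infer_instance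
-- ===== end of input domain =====

-- B peels one maximal contiguous run off the front at a time instead of A's
-- element-by-element scan into a mutable current group; alternative decomposition, not faster.

-- ===== PORT A =====
-- A's loop over i in range(1, len(ids)) reads ids[i] and ids[i-1]; it is transcribed as a
-- fold over the tail carrying (groups, current_group, prev = ids[i-1]) as the state.
def split_ids_into_groups_py (ids : List Int) : List (List Int) :=
  match ids with
  | [] => []
  | x :: xs =>
    let st := xs.foldl
      (fun (st : List (List Int) × List Int × Int) v =>
        if v > st.2.2 + 1 then (st.1 ++ [st.2.1], [v], v)
        else (st.1, st.2.1 ++ [v], v))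
      ([], [x], x)
    st.1 ++ [st.2.1]

-- ===== PORT B =====
-- Source B's inner while loop (k scanning rest[k] vs rest[k-1]) transcribed as structural
-- recursion carrying prev; returns (rest[1:k], rest[k:]) relative to the head.
def pvFirstRun : Int → List Int → List Int × List Int
  | _, [] => ([], [])
  | prev, x :: xs =>
    if x > prev + 1 then ([], x :: xs)
    else
      let p := pvFirstRun x xs
      (x :: p.1, p.2)

theorem pvFirstRun_snd_length : ∀ (prev : Int) (xs : List Int),
    (pvFirstRun prev xs).2.length ≤ xs.length := by
  intro prev xs
  induction xs generalizing prev with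
  | nil => simp [pvFirstRun]
  | cons x xs ih =>
    simp only [pvFirstRun]
    split
    · simp
    · exact Nat.le_trans (ih x) (Nat.le_succ _)

-- Source B's outer while loop: peel a run, append it, continue on the remaining suffix.
def split_ids_into_groups_py_alt : List Int → List (List Int)
  | [] => []
  | x :: xs => (x :: (pvFirstRun x xs).1) :: split_ids_into_groups_py_alt (pvFirstRun x xs).2
termination_by ids => ids.length
decreasing_by
  exact Nat.lt_succ_of_le (pvFirstRun_snd_length x xs)

-- ===== PRECONDITION & SPEC =====
def Spec_split_ids_into_groups_py (ids : List Int) (out : List (List Int)) : Prop := out = split_ids_into_groups_py_alt ids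
instance (ids : List Int) (out : List (List Int)) : Decidable (Spec_split_ids_into_groups_py ids out) := by unfold Spec_split_ids_into_groups_py; infer_instance

-- ===== CLAIM (what is proved, stated in full; the proofs are below) =====
def Claim_equal_split_ids_into_groups_py : Prop := ∀ (ids : List Int), Dom_split_ids_into_groups_py ids → Spec_split_ids_into_groups_py ids (split_ids_into_groups_py ids)

-- ===== LEMMAS AND PROOFS =====

-- Loop invariant for A's fold: the finished result is the groups so far, then the current
-- group extended by the rest of its run, then B's grouping of the remaining suffix.
theorem loopA_eq : ∀ (xs : List Int) (prev : Int) (groups : List (List Int)) (current : List Int),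
    (let st := xs.foldl
        (fun (st : List (List Int) × List Int × Int) v =>
          if v > st.2.2 + 1 then (st.1 ++ [st.2.1], [v], v)
          else (st.1, st.2.1 ++ [v], v))
        (groups, current, prev)
     st.1 ++ [st.2.1])
    = groups ++ ((current ++ (pvFirstRun prev xs).1)
        :: split_ids_into_groups_py_alt (pvFirstRun prev xs).2) := by
  intro xs
  induction xs with
  | nil =>
    intro prev groups current
    simp [pvFirstRun, split_ids_into_groups_py_alt]
  | cons v ys ih =>
    intro prev groups current
    by_cases h : v > prev + 1
    · simp only [List.foldl_cons, pvFirstRun, if_pos h]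
      rw [ih v (groups ++ [current]) [v]]
      simp [split_ids_into_groups_py_alt]
    · simp only [List.foldl_cons, pvFirstRun, if_neg h]
      rw [ih v groups (current ++ [v])]
      simp

-- ===== VERDICT (by name: the statement is the Claim_ definition above) =====
theorem split_ids_into_groups_py_spec : Claim_equal_split_ids_into_groups_py := by
  intro ids _
  unfold Spec_split_ids_into_groups_py
  match ids with
  | [] => simp [split_ids_into_groups_py, split_ids_into_groups_py_alt]
  | x :: xs =>
    show (let st := xs.foldl _ ([], [x], x); st.1 ++ [st.2.1]) = _
    rw [loopA_eq xs x [] [x]]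
    simp [split_ids_into_groups_py_alt]
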